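-- pv_equiv track=rewrite | github.com/blurrycontour/google-foobar | L3/queue.py | solution
-- ===== SOURCE A (Python) =====
-- def solution(start, length):
--     def onexor(x):
--         if x % 4 == 0:
--             return 0
--         if x % 4 == 1:
--             return x-1
--         if x % 4 == 2:
--             return 1
--         if x % 4 == 3:
--             return x
--
--     checksum = None
--     for i in range(length):
--         row_checksum = onexor(start)^onexor(start+length-i)
--         if i == 0:
--             checksum = row_checksum
--         else:
--             checksum ^= row_checksum
--         start += length
--     return checksum
-- ===== SOURCE B (Python) =====
-- def _range_xor(a, b):
--     # XOR of all integers in [a, b) for a <= b, via parity of the boundaries: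
--     # consecutive pairs (2k, 2k+1) XOR to 1, so after peeling an odd head and
--     # an odd tail only the parity of the number of remaining pairs matters.
--     res = 0
--     if a < b and a % 2 != 0:
--         res ^= a
--         a += 1
--     if a < b and b % 2 != 0:
--         b -= 1
--         res ^= b
--     if (b - a) // 2 % 2 != 0:
--         res ^= 1
--     return res
--
--
-- def solution(start, length):
--     if length <= 0:
--         return None
--     total = _range_xor(start, start + length * length)
--     for i in range(length):
--         row_end = start + (i + 1) * length
--         total ^= _range_xor(row_end - i, row_end)
--     return total
-- ===== Notes on version B (the rewrite author's own statement) =====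
-- stated objective: alternative
-- what changed: B has no prefix-XOR helper and no running-start row loop: it XORs the whole length x length rectangle in O(1) via a boundary-parity range-XOR and then XORs away each row's excluded tail (the complement), while A accumulates each row directly from the onexor prefix identity.
import Mathlib
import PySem

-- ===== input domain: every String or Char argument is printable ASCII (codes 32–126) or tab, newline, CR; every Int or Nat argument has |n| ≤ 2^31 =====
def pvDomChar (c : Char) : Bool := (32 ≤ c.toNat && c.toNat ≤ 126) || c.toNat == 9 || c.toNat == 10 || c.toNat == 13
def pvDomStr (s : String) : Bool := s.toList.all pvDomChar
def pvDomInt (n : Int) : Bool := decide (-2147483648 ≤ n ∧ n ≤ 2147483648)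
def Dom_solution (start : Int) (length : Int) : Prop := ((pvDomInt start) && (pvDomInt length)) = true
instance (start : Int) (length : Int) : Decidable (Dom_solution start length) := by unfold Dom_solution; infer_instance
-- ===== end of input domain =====

-- B drops A's per-row prefix-XOR identity (onexor) and its running start: it XORs the whole
-- length×length rectangle via a boundary-parity range-XOR and XORs away each row's excluded tail.

-- ===== PORT A =====
-- A's inner helper onexor; the trailing 'else x' is the 'x % 4 == 3' branch, exact because
-- PySem.Int.mod x 4 is always one of 0,1,2,3 (Python's falling-off-the-end None is unreachable).
def onexorA (x : Int) : Int :=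
  if PySem.Int.mod x 4 = 0 then 0
  else if PySem.Int.mod x 4 = 1 then x - 1
  else if PySem.Int.mod x 4 = 2 then 1
  else x

def solution (start : Int) (length : Int) : Option Int :=
  -- state: (checksum, start); 'checksum ^= rc' ported as Option.map, exact because
  -- checksum is already set (some _) on every iteration with i ≠ 0
  ((PySem.List.pyRange 0 length 1).foldl
    (fun (st : Option Int × Int) i =>
      let rc := PySem.Int.bxor (onexorA st.2) (onexorA (st.2 + length - i))
      let cs : Option Int :=
        if i = 0 then some rc
        else st.1.map (fun c => PySem.Int.bxor c rc)
      (cs, st.2 + length))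
    (none, start)).1

-- ===== PORT B =====
-- port of B's helper _range_xor, step for step (the mutated res/a/b threaded through lets)
def pvRxor (a b : Int) : Int :=
  let res : Int := 0
  let p := if a < b ∧ PySem.Int.mod a 2 ≠ 0 then (PySem.Int.bxor res a, a + 1) else (res, a)
  let res := p.1
  let a := p.2
  let q := if a < b ∧ PySem.Int.mod b 2 ≠ 0 then (PySem.Int.bxor res (b - 1), b - 1) else (res, b)
  let res := q.1
  let b := q.2
  if PySem.Int.mod (PySem.Int.floordiv (b - a) 2) 2 ≠ 0 then PySem.Int.bxor res 1 else res

def solution_alt (start : Int) (length : Int) : Option Int :=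
  if length ≤ 0 then none
  else some ((PySem.List.pyRange 0 length 1).foldl
      (fun total i =>
        let rowEnd := start + (i + 1) * length
        PySem.Int.bxor total (pvRxor (rowEnd - i) rowEnd))
      (pvRxor start (start + length * length)))

-- ===== PRECONDITION & SPEC =====
def Spec_solution (start : Int) (length : Int) (out : Option Int) : Prop := out = solution_alt start length
instance (start : Int) (length : Int) (out : Option Int) : Decidable (Spec_solution start length out) := by unfold Spec_solution; infer_instance

-- ===== CLAIM (what is proved, stated in full; the proofs are below) =====
def Claim_equal_solution : Prop := ∀ (start : Int) (length : Int), Dom_solution start length → Spec_solution start length (solution start length)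

-- ===== LEMMAS AND PROOFS =====

-- bxor algebra --------------------------------------------------------------

theorem pvBxor_eq_xor (a b : Int) : PySem.Int.bxor a b = Int.xor a b := by
  rcases a with m | m <;> rcases b with n | n <;>
    simp [PySem.Int.bxor, Int.xor, Int.negSucc_eq] <;> omega

theorem pvXor_assoc (a b c : Int) : Int.xor (Int.xor a b) c = Int.xor a (Int.xor b c) := by
  rcases a with m | m <;> rcases b with n | n <;> rcases c with p | p <;>
    simp [Int.xor, Nat.xor_assoc]

theorem pvBxor_assoc (a b c : Int) :
    PySem.Int.bxor (PySem.Int.bxor a b) c = PySem.Int.bxor a (PySem.Int.bxor b c) := by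
  rw [pvBxor_eq_xor, pvBxor_eq_xor, pvBxor_eq_xor, pvBxor_eq_xor]
  exact pvXor_assoc a b c

theorem pvBxor_left_comm (a b c : Int) :
    PySem.Int.bxor a (PySem.Int.bxor b c) = PySem.Int.bxor b (PySem.Int.bxor a c) := by
  rw [← pvBxor_assoc, PySem.Int.bxor_comm a b, pvBxor_assoc]

theorem pvBxor_zero_left (a : Int) : PySem.Int.bxor 0 a = a := by
  rw [PySem.Int.bxor_comm]; exact PySem.Int.bxor_zero a

theorem pvBxor_cancel (a b : Int) : PySem.Int.bxor a (PySem.Int.bxor a b) = b := by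
  rw [← pvBxor_assoc, PySem.Int.bxor_self, pvBxor_zero_left]

theorem pvBxor_two_mul_one (k : Int) : PySem.Int.bxor (2 * k) 1 = 2 * k + 1 := by
  rw [pvBxor_eq_xor]
  rcases k with m | m
  · have : (2 * Int.ofNat m) = Int.ofNat (2 * m) := by
      simp only [Int.ofNat_eq_natCast]; push_cast; ring
    rw [this]
    show Int.xor (Int.ofNat (2 * m)) (Int.ofNat 1) = _
    have hn : (2 * m) ^^^ 1 = 2 * m + 1 := by
      simp [Nat.mul_comm]
    simp [Int.xor, hn]
  · have : (2 * Int.negSucc m) = Int.negSucc (2 * m + 1) := by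
      simp [Int.negSucc_eq]; ring
    rw [this]
    show Int.xor (Int.negSucc (2 * m + 1)) (Int.ofNat 1) = _
    have hn : (2 * m + 1) ^^^ 1 = 2 * m := by
      simpa [Nat.bit_val, Nat.mul_comm] using Nat.xor_bit true m true 0
    simp [Int.xor, hn, Int.negSucc_eq]

-- Python-mod / floordiv bridges ---------------------------------------------

theorem pvMod2 (y : Int) : PySem.Int.mod y 2 = y % 2 := by
  simp [PySem.Int.mod, Int.fmod_eq_emod]

theorem pvMod4 (y : Int) : PySem.Int.mod y 4 = y % 4 := by
  simp [PySem.Int.mod, Int.fmod_eq_emod]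

theorem pvFdiv2 (y : Int) : PySem.Int.floordiv y 2 = y / 2 := by
  simp [PySem.Int.floordiv, Int.fdiv_eq_ediv]

-- onexor facts ---------------------------------------------------------------

theorem pvOnexor_even0 (x : Int) (h : x % 4 = 0) : onexorA x = 0 := by
  simp only [onexorA, pvMod4]
  rw [if_pos h]

theorem pvOnexor_even2 (x : Int) (h : x % 4 = 2) : onexorA x = 1 := by
  simp only [onexorA, pvMod4]
  rw [if_neg (by omega), if_neg (by omega), if_pos h]

-- onexor is a prefix-XOR: onexor (x+1) = onexor x ^ x, for every Int x
theorem pvOnexor_step (x : Int) : onexorA (x + 1) = PySem.Int.bxor (onexorA x) x := by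
  simp only [onexorA, pvMod4]
  have h4 : x % 4 = 0 ∨ x % 4 = 1 ∨ x % 4 = 2 ∨ x % 4 = 3 := by omega
  rcases h4 with h | h | h | h
  · rw [if_neg (by omega), if_pos (by omega), if_pos h]
    rw [pvBxor_zero_left]; ring
  · rw [if_neg (by omega), if_neg (by omega), if_pos (by omega),
        if_neg (by omega), if_pos h]
    obtain ⟨k, hk⟩ : ∃ k, x = 2 * k + 1 := ⟨x / 2, by omega⟩
    subst hk
    rw [show (2 * k + 1 - 1 : Int) = 2 * k by ring]
    rw [show (2 * k + 1 : Int) = PySem.Int.bxor (2 * k) 1 from (pvBxor_two_mul_one k).symm,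
        ← pvBxor_assoc, PySem.Int.bxor_self, pvBxor_zero_left]
  · rw [if_neg (by omega), if_neg (by omega), if_neg (by omega),
        if_neg (by omega), if_neg (by omega), if_pos h]
    obtain ⟨k, hk⟩ : ∃ k, x = 2 * k := ⟨x / 2, by omega⟩
    subst hk
    rw [PySem.Int.bxor_comm, pvBxor_two_mul_one]
  · rw [if_pos (by omega), if_neg (by omega), if_neg (by omega), if_neg (by omega)]
    rw [PySem.Int.bxor_self]

-- onexor a = onexor (a+1) ^ a
theorem pvOnexor_unstep (a : Int) : onexorA a = PySem.Int.bxor (onexorA (a + 1)) a := by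
  rw [pvOnexor_step, pvBxor_assoc, PySem.Int.bxor_self, PySem.Int.bxor_zero]

-- onexor b = onexor (b-1) ^ (b-1)
theorem pvOnexor_pred (b : Int) : onexorA b = PySem.Int.bxor (onexorA (b - 1)) (b - 1) := by
  have := pvOnexor_step (b - 1)
  rw [show b - 1 + 1 = b by ring] at this
  exact this

-- the range-xor helper ------------------------------------------------------

theorem pvIte_pull (c : Prop) [Decidable c] (res : Int) :
    (if c then PySem.Int.bxor res 1 else res)
      = PySem.Int.bxor res (if c then 1 else 0) := by
  split_ifs with h
  · rfl
  · rw [PySem.Int.bxor_zero]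

-- even-even core: the pair-parity bit is exactly onexor a ^ onexor b
theorem pvCore (a b : Int) (hab : a ≤ b) (ha : a % 2 = 0) (hb : b % 2 = 0) :
    (if ((b - a) / 2) % 2 ≠ 0 then (1 : Int) else 0)
      = PySem.Int.bxor (onexorA a) (onexorA b) := by
  rcases (show a % 4 = 0 ∨ a % 4 = 2 by omega) with h1 | h1 <;>
    rcases (show b % 4 = 0 ∨ b % 4 = 2 by omega) with h2 | h2
  · rw [pvOnexor_even0 a h1, pvOnexor_even0 b h2, if_neg (by omega)]; decide
  · rw [pvOnexor_even0 a h1, pvOnexor_even2 b h2, if_pos (by omega)]; decide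
  · rw [pvOnexor_even2 a h1, pvOnexor_even0 b h2, if_pos (by omega)]; decide
  · rw [pvOnexor_even2 a h1, pvOnexor_even2 b h2, if_neg (by omega)]; decide

-- B's helper computes XOR over [a, b) = onexor a ^ onexor b
theorem pvRxor_spec (a b : Int) (hab : a ≤ b) :
    pvRxor a b = PySem.Int.bxor (onexorA a) (onexorA b) := by
  simp only [pvRxor, pvMod2, pvFdiv2]
  by_cases h1 : a < b ∧ a % 2 ≠ 0
  · rw [if_pos h1]
    by_cases h2 : a + 1 < b ∧ b % 2 ≠ 0
    · -- strip both ends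
      rw [if_pos h2]
      simp only
      rw [pvIte_pull, pvCore (a+1) (b-1) (by omega) (by omega) (by omega),
          pvOnexor_unstep a, pvOnexor_pred b]
      simp [PySem.Int.bxor_comm, pvBxor_left_comm, pvBxor_zero_left]
    · rw [if_neg h2]
      simp only
      rcases (show a + 1 = b ∨ (a + 1 < b ∧ b % 2 = 0) by omega) with h3 | h3
      · -- single odd element
        rw [pvIte_pull, if_neg (by omega), PySem.Int.bxor_zero, pvOnexor_unstep a, h3]
        simp [PySem.Int.bxor_comm, pvBxor_left_comm, pvBxor_zero_left,
              PySem.Int.bxor_self, pvBxor_cancel]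
      · -- strip the head only
        rw [pvIte_pull, pvCore (a+1) b (by omega) (by omega) (by omega), pvOnexor_unstep a]
        simp [PySem.Int.bxor_comm, pvBxor_left_comm, pvBxor_zero_left]
  · rw [if_neg h1]
    simp only
    by_cases h2 : a < b ∧ b % 2 ≠ 0
    · -- strip the tail only (a is even here)
      rw [if_pos h2]
      simp only
      rw [pvIte_pull, pvCore a (b-1) (by omega) (by omega) (by omega), pvOnexor_pred b]
      simp [PySem.Int.bxor_comm, pvBxor_left_comm, pvBxor_zero_left]
    · rw [if_neg h2]
      simp only
      rcases (show a = b ∨ (a < b ∧ a % 2 = 0 ∧ b % 2 = 0) by omega) with h3 | h3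
      · subst h3
        rw [pvIte_pull, if_neg (by omega), PySem.Int.bxor_zero, PySem.Int.bxor_self]
      · rw [pvIte_pull, pvCore a b (by omega) (by omega) (by omega), pvBxor_zero_left]

-- named loop bodies (definitionally equal to the ports' lambdas), for proof bookkeeping

def pvStepA (length : Int) (st : Option Int × Int) (i : Int) : Option Int × Int :=
  let rc := PySem.Int.bxor (onexorA st.2) (onexorA (st.2 + length - i))
  let cs : Option Int :=
    if i = 0 then some rc
    else st.1.map (fun c => PySem.Int.bxor c rc)
  (cs, st.2 + length)

def pvStepB (start length : Int) (total : Int) (i : Int) : Int :=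
  let rowEnd := start + (i + 1) * length
  PySem.Int.bxor total (pvRxor (rowEnd - i) rowEnd)

theorem pvSolution_eq (start length : Int) :
    solution start length
      = ((PySem.List.pyRange 0 length 1).foldl (pvStepA length) (none, start)).1 := rfl

theorem pvAlt_eq (start length : Int) :
    solution_alt start length
      = if length ≤ 0 then none
        else some ((PySem.List.pyRange 0 length 1).foldl (pvStepB start length)
          (pvRxor start (start + length * length))) := rfl

-- loop invariant: after m of the rows, A's running start is start + m*length, A's checksum
-- is set (for m ≥ 1) and B's accumulator differs from it by the still-unprocessed suffix
theorem pvInvariant (start length : Int) (m : Nat) (hm : (m : Int) ≤ length) :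
    ((PySem.List.pyRange 0 (m : Int) 1).foldl (pvStepA length) (none, start)).2
        = start + (m : Int) * length
    ∧ (m = 0 → ((PySem.List.pyRange 0 (m : Int) 1).foldl (pvStepA length) (none, start)).1 = none)
    ∧ (m ≠ 0 → ∃ c,
        ((PySem.List.pyRange 0 (m : Int) 1).foldl (pvStepA length) (none, start)).1 = some c
        ∧ (PySem.List.pyRange 0 (m : Int) 1).foldl (pvStepB start length)
            (pvRxor start (start + length * length))
          = PySem.Int.bxor c (PySem.Int.bxor (onexorA (start + (m : Int) * length))
              (onexorA (start + length * length)))) := by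
  induction m with
  | zero =>
      rw [PySem.List.pyRange_one_eq_nil (by norm_num)]
      exact ⟨by simp, fun _ => rfl, fun h => absurd rfl h⟩
  | succ m ih =>
      have hm' : (m : Int) ≤ length := by push_cast at hm ⊢; omega
      have hmlt : (m : Int) < length := by push_cast at hm ⊢; omega
      obtain ⟨h2, hz, hs⟩ := ih hm'
      have hcast : ((m + 1 : Nat) : Int) = (m : Int) + 1 := by push_cast; ring
      rw [hcast, PySem.List.pyRange_one_succ_right (by positivity), List.foldl_append,
          List.foldl_append]
      simp only [List.foldl]
      rw [show List.foldl (pvStepA length) (none, start) (PySem.List.pyRange 0 ((m : Nat) : Int) 1)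
            = ((List.foldl (pvStepA length) (none, start) (PySem.List.pyRange 0 ((m : Nat) : Int) 1)).1,
               (List.foldl (pvStepA length) (none, start) (PySem.List.pyRange 0 ((m : Nat) : Int) 1)).2) from rfl,
          h2]
      -- B's gap term for row m, via the rxor spec
      have hgap : pvStepB start length
            ((PySem.List.pyRange 0 ((m : Nat) : Int) 1).foldl (pvStepB start length)
              (pvRxor start (start + length * length))) ((m : Nat) : Int)
          = PySem.Int.bxor
              ((PySem.List.pyRange 0 ((m : Nat) : Int) 1).foldl (pvStepB start length)
                (pvRxor start (start + length * length)))
              (PySem.Int.bxor (onexorA (start + (m : Int) * length + length - (m : Int)))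
                (onexorA (start + ((m : Int) + 1) * length))) := by
        simp only [pvStepB]
        rw [show start + ((m : Int) + 1) * length - (m : Int)
               = start + (m : Int) * length + length - (m : Int) from by ring,
            show start + ((m : Int) + 1) * length
               = start + (m : Int) * length + length from by ring,
            pvRxor_spec (start + (m : Int) * length + length - (m : Int))
              (start + (m : Int) * length + length) (by omega)]
      by_cases hm0 : m = 0
      · subst hm0
        rw [hz rfl]
        simp only [pvStepA, if_pos (show ((0 : Nat) : Int) = 0 by norm_num)]
        refine ⟨by push_cast; ring, by simp, fun _ => ⟨_, rfl, ?_⟩⟩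
        rw [PySem.List.pyRange_one_eq_nil (by norm_num)] at hgap ⊢
        simp only [List.foldl] at hgap ⊢
        rw [hgap, pvRxor_spec start (start + length * length)
              (by nlinarith [mul_self_nonneg length])]
        ring_nf
        simp [pvBxor_assoc, PySem.Int.bxor_comm, pvBxor_left_comm, PySem.Int.bxor_self,
              PySem.Int.bxor_zero, pvBxor_zero_left, pvBxor_cancel]
      · obtain ⟨c, hc, hB⟩ := hs hm0
        rw [hc]
        have hi0 : ¬ ((m : Int) = 0) := by exact_mod_cast hm0
        simp only [pvStepA, if_neg hi0, Option.map_some]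
        refine ⟨by push_cast; ring, by simp, fun _ => ⟨_, rfl, ?_⟩⟩
        rw [hgap, hB]
        simp [PySem.Int.bxor_comm, pvBxor_left_comm]

theorem pvMain (start length : Int) : solution start length = solution_alt start length := by
  rw [pvSolution_eq, pvAlt_eq]
  by_cases hl : length ≤ 0
  · rw [if_pos hl, PySem.List.pyRange_one_eq_nil hl]
    rfl
  · rw [if_neg hl]
    have hn : ((length.toNat : Nat) : Int) = length := by omega
    obtain ⟨c, hc, hB⟩ := (pvInvariant start length length.toNat (by omega)).2.2 (by omega)
    rw [hn] at hc hB
    rw [hc, hB, PySem.Int.bxor_self, PySem.Int.bxor_zero]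

-- ===== VERDICT (by name: the statement is the Claim_ definition above) =====
theorem solution_spec : Claim_equal_solution := by
  intro start length _
  unfold Spec_solution
  exact pvMain start length
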